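-- pv_equiv track=rewrite | github.com/open-cu/code-cheating | course/1/subject_python/H/40501-39176.py | solution
-- ===== SOURCE A (Python) =====
-- def solution(text: str) -> str:
--     counter = 0
--     left = 0
--     while left < len(text) and text[left] == 'a':
--         left += 1
--         counter += 1
--     right = len(text) - 1
--     while right >= 0 and text[right] == 'a':
--         right -= 1
--         counter -= 1
--
--     if counter > 0:
--         return 'No'
--     stripped_text = text[max(left, 0):min(right + 1, len(text))]
--
--     if len(stripped_text) % 2 == 1:
--         left = right = len(stripped_text) // 2
--     else:
--         right = len(stripped_text) // 2
--         left = right - 1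
--     while left >= 0:
--         if stripped_text[left] != stripped_text[right]:
--             return 'No'
--         left -= 1
--         right += 1
--     return 'Yes'
-- ===== SOURCE B (Python) =====
-- def solution(text: str) -> str:
--     n = len(text)
--     lead = n - len(text.lstrip('a'))
--     trail = n - len(text.rstrip('a'))
--     if lead > trail:
--         return 'No'
--     s = text[lead:n - trail]
--     return 'Yes' if s == s[::-1] else 'No'
-- ===== Notes on version B (the rewrite author's own statement) =====
-- stated objective: simpler
-- what changed: Replaces the two index while-scans and the counter accumulator by lstrip/rstrip length arithmetic, and the center-outward two-pointer loop by a single reverse-and-compare of the stripped slice.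
import Mathlib
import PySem

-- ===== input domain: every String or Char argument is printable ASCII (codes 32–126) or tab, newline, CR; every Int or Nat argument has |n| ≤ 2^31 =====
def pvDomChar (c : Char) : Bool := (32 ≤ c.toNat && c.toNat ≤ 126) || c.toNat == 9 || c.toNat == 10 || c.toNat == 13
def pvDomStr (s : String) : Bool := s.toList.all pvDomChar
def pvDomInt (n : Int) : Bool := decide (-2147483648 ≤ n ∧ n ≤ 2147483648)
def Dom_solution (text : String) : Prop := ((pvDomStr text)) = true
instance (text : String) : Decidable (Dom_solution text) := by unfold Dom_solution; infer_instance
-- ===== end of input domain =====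

-- B replaces A's index while-scans + counter accumulator by lstrip/rstrip length arithmetic,
-- and A's center-outward two-pointer loop by a reverse-and-compare of the stripped slice (objective: simpler).

-- ===== PORT A =====
-- first while loop: while left < len(text) and text[left] == 'a': left += 1; counter += 1
def pvScanL (cs : List Char) (left : Nat) (counter : Int) : Nat × Int :=
  if h : left < cs.length then
    if cs[left] == 'a' then pvScanL cs (left + 1) (counter + 1) else (left, counter)
  else (left, counter)
termination_by cs.length - left

-- second while loop: while right >= 0 and text[right] == 'a': right -= 1; counter -= 1
-- (text[right] is in range whenever 0 <= right, since right starts at len-1 and only decreases,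
-- so testing 'pyGet? = some _' is exact: no IndexError occurs)
def pvScanR (cs : List Char) (right : Int) (counter : Int) : Int × Int :=
  if h : 0 ≤ right ∧ PySem.List.pyGet? cs right = some 'a' then
    pvScanR cs (right - 1) (counter - 1)
  else (right, counter)
termination_by (right + 1).toNat
decreasing_by omega

-- final while loop: while left >= 0: if s[left] != s[right]: return 'No'; left -= 1; right += 1
def pvChk (cs : List Char) (l r : Int) : String :=
  if h : 0 ≤ l then
    match PySem.List.pyGet? cs l, PySem.List.pyGet? cs r with
    | some a, some b => if a ≠ b then "No" else pvChk cs (l - 1) (r + 1)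
    | _, _ => "No"  -- unreachable: l + r = len - 1 throughout, so both indices are in range (no IndexError)
  else "Yes"
termination_by (l + 1).toNat
decreasing_by omega

def solution (text : String) : String :=
  let cs := text.toList
  let p1 := pvScanL cs 0 0
  let p2 := pvScanR cs ((cs.length : Int) - 1) p1.2
  if p2.2 > 0 then "No"
  else
    let st := PySem.List.slice cs (some (max (p1.1 : Int) 0)) (some (min (p2.1 + 1) (cs.length : Int)))
    let half := PySem.Int.floordiv (st.length : Int) 2
    if PySem.Int.mod (st.length : Int) 2 = 1 then pvChk st half half
    else pvChk st (half - 1) half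

-- ===== PORT B =====
def solution_alt (text : String) : String :=
  let cs := text.toList
  let n := cs.length
  let lead := n - (cs.dropWhile (· == 'a')).length                       -- n - len(text.lstrip('a'))
  let trail := n - ((cs.reverse.dropWhile (· == 'a')).reverse).length    -- n - len(text.rstrip('a'))
  if lead > trail then "No"
  else
    let s := PySem.List.slice cs (some (lead : Int)) (some ((n - trail : Nat) : Int))
    if s == s.reverse then "Yes" else "No"

-- ===== PRECONDITION & SPEC =====
def Spec_solution (text : String) (out : String) : Prop := out = solution_alt text
instance (text : String) (out : String) : Decidable (Spec_solution text out) := by unfold Spec_solution; infer_instance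

-- ===== CLAIM (what is proved, stated in full; the proofs are below) =====
def Claim_equal_solution : Prop := ∀ (text : String), Dom_solution text → Spec_solution text (solution text)

-- ===== LEMMAS AND PROOFS =====

theorem pvScanL_eq (cs : List Char) (left : Nat) (counter : Int) :
    pvScanL cs left counter =
      (left + ((cs.drop left).takeWhile (· == 'a')).length,
       counter + (((cs.drop left).takeWhile (· == 'a')).length : Int)) := by
  induction left, counter using pvScanL.induct cs with
  | case1 left counter h ha ih =>
      rw [pvScanL]
      rw [List.drop_eq_getElem_cons h]
      simp only [dif_pos h, if_pos ha, ih, List.takeWhile_cons, ha]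
      simp
      constructor <;> omega
  | case2 left counter h ha =>
      rw [pvScanL]
      rw [List.drop_eq_getElem_cons h]
      simp only [dif_pos h, if_neg ha, List.takeWhile_cons, ha]
      simp
  | case3 left counter h =>
      rw [pvScanL]
      simp only [dif_neg h]
      rw [List.drop_eq_nil_of_le (by omega)]
      simp

theorem pvScanR_eq (cs : List Char) (right : Int) (counter : Int) (hr : right < (cs.length : Int)) :
    pvScanR cs right counter =
      (right - (((cs.take (right + 1).toNat).reverse.takeWhile (· == 'a')).length : Int),
       counter - (((cs.take (right + 1).toNat).reverse.takeWhile (· == 'a')).length : Int)) := by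
  induction right, counter using pvScanR.induct cs with
  | case1 right counter h ih =>
      rw [pvScanR]
      simp only [dif_pos h]
      obtain ⟨h0, hget⟩ := h
      have hrn : right.toNat < cs.length := by omega
      have hget' : cs[right.toNat] = 'a' := by
        rw [PySem.List.pyGet?_eq_some_getElem cs h0 hr] at hget
        exact Option.some.injEq _ _ ▸ (by simpa using hget)
      have htake : cs.take (right + 1).toNat = cs.take right.toNat ++ [cs[right.toNat]] := by
        have : (right + 1).toNat = right.toNat + 1 := by omega
        rw [this, List.take_succ, List.getElem?_eq_getElem hrn]
        simp
      rw [ih (by omega), htake]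
      have : (right - 1 + 1).toNat = right.toNat := by omega
      rw [this]
      simp [hget']
      constructor <;> ring
  | case2 right counter h =>
      rw [pvScanR]
      simp only [dif_neg h]
      rcases lt_or_ge right 0 with hneg | hpos
      · have : (right + 1).toNat = 0 := by omega
        simp [this]
      · have hrn : right.toNat < cs.length := by omega
        have hget : PySem.List.pyGet? cs right = some cs[right.toNat] :=
          PySem.List.pyGet?_eq_some_getElem cs hpos hr
        have hne : cs[right.toNat] ≠ 'a' := by
          intro hc; exact h ⟨hpos, by rw [hget, hc]⟩
        have htake : cs.take (right + 1).toNat = cs.take right.toNat ++ [cs[right.toNat]] := by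
          have : (right + 1).toNat = right.toNat + 1 := by omega
          rw [this, List.take_succ, List.getElem?_eq_getElem hrn]
          simp
        have hrev : (cs.take right.toNat ++ [cs[right.toNat]]).reverse
            = cs[right.toNat] :: (cs.take right.toNat).reverse := by simp
        have hfalse : (cs[right.toNat] == 'a') = false := by simpa using hne
        rw [htake, hrev, List.takeWhile_cons, hfalse]
        simp

theorem pvChk_iff (cs : List Char) (l : Nat) (hl : l < cs.length) :
    pvChk cs (l : Int) ((cs.length - 1 - l : Nat) : Int) = "Yes" ↔
      ∀ j, j ≤ l → cs[j]? = cs[cs.length - 1 - j]? := by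
  induction l with
  | zero =>
      rw [pvChk]
      have h1 : PySem.List.pyGet? cs (0 : Nat) = some cs[0] :=
        PySem.List.pyGet?_eq_some_getElem cs (by omega) (by exact_mod_cast hl)
      have h2 : PySem.List.pyGet? cs ((cs.length - 1 - 0 : Nat) : Int) = some cs[cs.length - 1 - 0] :=
        PySem.List.pyGet?_eq_some_getElem cs (by omega) (by push_cast; omega)
      simp only [dif_pos (by omega : (0:Int) ≤ (0:Nat)), h1, h2]
      by_cases he : cs[0] = cs[cs.length - 1 - 0]
      · have : pvChk cs ((0:Nat) - 1) (((cs.length - 1 - 0 : Nat) : Int) + 1) = "Yes" := by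
          rw [pvChk]; simp
        simp only [he, ne_eq, not_true_eq_false, if_false, this]
        constructor
        · intro _ j hj
          interval_cases j
          rw [List.getElem?_eq_getElem hl, List.getElem?_eq_getElem (by omega)]
          exact congrArg some he
        · intro _; simp [this]
      · simp only [he, ne_eq, not_false_eq_true, if_true]
        constructor
        · intro hcon; exact absurd hcon (by decide)
        · intro hall
          have := hall 0 (by omega)
          rw [List.getElem?_eq_getElem hl, List.getElem?_eq_getElem (by omega)] at this
          exact absurd (Option.some.inj this) he
  | succ l ih =>
      rw [pvChk]
      have hln : l < cs.length := by omega
      have h1 : PySem.List.pyGet? cs ((l + 1 : Nat) : Int) = some cs[l + 1] := by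
        have := PySem.List.pyGet?_eq_some_getElem cs (i := ((l+1 : Nat) : Int)) (by omega) (by exact_mod_cast hl)
        simpa using this
      have h2 : PySem.List.pyGet? cs ((cs.length - 1 - (l + 1) : Nat) : Int) = some cs[cs.length - 1 - (l + 1)] := by
        have := PySem.List.pyGet?_eq_some_getElem cs (i := ((cs.length - 1 - (l+1) : Nat) : Int)) (by omega) (by push_cast; omega)
        simpa using this
      simp only [dif_pos (by omega : (0:Int) ≤ ((l+1 : Nat) : Int)), h1, h2]
      have harg1 : ((l + 1 : Nat) : Int) - 1 = (l : Int) := by push_cast; ring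
      have harg2 : ((cs.length - 1 - (l + 1) : Nat) : Int) + 1 = ((cs.length - 1 - l : Nat) : Int) := by
        push_cast [Nat.cast_sub] <;> omega
      by_cases he : cs[l + 1] = cs[cs.length - 1 - (l + 1)]
      · simp only [he, ne_eq, not_true_eq_false, if_false, harg1, harg2, ih hln]
        constructor
        · intro hall j hj
          rcases Nat.lt_or_ge j (l + 1) with hj' | hj'
          · exact hall j (by omega)
          · have : j = l + 1 := by omega
            subst this
            rw [List.getElem?_eq_getElem hl, List.getElem?_eq_getElem (by omega)]
            exact congrArg some he
        · intro hall j hj; exact hall j (by omega)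
      · simp only [he, ne_eq, not_false_eq_true, if_true]
        constructor
        · intro hcon; exact absurd hcon (by decide)
        · intro hall
          have := hall (l + 1) (by omega)
          rw [List.getElem?_eq_getElem hl, List.getElem?_eq_getElem (by omega)] at this
          exact absurd (Option.some.inj this) he

theorem pal_iff (cs : List Char) (l : Nat) (h2 : cs.length ≤ 2 * l + 2) (hl : l < cs.length) :
    (∀ j, j ≤ l → cs[j]? = cs[cs.length - 1 - j]?) ↔ cs = cs.reverse := by
  constructor
  · intro hall
    apply List.ext_getElem?
    intro i
    rcases Nat.lt_or_ge i cs.length with hi | hi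
    · rw [List.getElem?_reverse hi]
      by_cases hil : i ≤ l
      · exact hall i hil
      · have h' := hall (cs.length - 1 - i) (by omega)
        have : cs.length - 1 - (cs.length - 1 - i) = i := by omega
        rw [this] at h'
        exact h'.symm
    · rw [List.getElem?_eq_none (by omega), List.getElem?_eq_none (by simp; omega)]
  · intro hrev j hj
    conv_lhs => rw [hrev]
    rw [List.getElem?_reverse (by omega)]

theorem pvChk_yes_or_no (cs : List Char) (l r : Int) :
    pvChk cs l r = "Yes" ∨ pvChk cs l r = "No" := by
  induction l, r using pvChk.induct cs with
  | _ =>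
      rw [pvChk]
      split
      all_goals try omega
      all_goals try simp
      all_goals (split <;> simp_all)

theorem pvChk_pal (st : List Char) (l0 : Nat) (hl : l0 < st.length) (h2 : st.length ≤ 2 * l0 + 2) :
    pvChk st (l0 : Int) ((st.length - 1 - l0 : Nat) : Int) = (if st == st.reverse then "Yes" else "No") := by
  by_cases hpal : st = st.reverse
  · rw [if_pos (by simpa using hpal)]
    exact (pvChk_iff st l0 hl).2 ((pal_iff st l0 h2 hl).2 hpal)
  · rw [if_neg (by simpa using hpal)]
    rcases pvChk_yes_or_no st (l0 : Int) ((st.length - 1 - l0 : Nat) : Int) with hy | hn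
    · exact absurd ((pal_iff st l0 h2 hl).1 ((pvChk_iff st l0 hl).1 hy)) hpal
    · exact hn

theorem pvMain (text : String) : solution text = solution_alt text := by
  simp only [solution, solution_alt]
  set cs := text.toList with hcs
  set lead := (cs.takeWhile (· == 'a')).length with hlead
  set trail := (cs.reverse.takeWhile (· == 'a')).length with htrail
  have hleadle : lead ≤ cs.length := (List.takeWhile_sublist _).length_le
  have htrailne : trail ≤ cs.length := le_trans (List.takeWhile_sublist _).length_le (by simp)
  have hA1 : pvScanL cs 0 0 = (lead, (lead : Int)) := by
    rw [pvScanL_eq]; simp [hlead]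
  have hA2 : pvScanR cs ((cs.length : Int) - 1) (lead : Int)
      = ((cs.length : Int) - 1 - trail, (lead : Int) - trail) := by
    rw [pvScanR_eq _ _ _ (by omega)]
    have h' : ((cs.length : Int) - 1 + 1).toNat = cs.length := by omega
    rw [h', List.take_length]
  have hdw : (cs.dropWhile (· == 'a')).length = cs.length - lead := by
    have := congrArg List.length (List.takeWhile_append_dropWhile (p := (· == 'a')) (l := cs))
    simp only [List.length_append] at this
    omega
  have hrw : ((cs.reverse.dropWhile (· == 'a')).reverse).length = cs.length - trail := by
    rw [List.length_reverse]
    have := congrArg List.length (List.takeWhile_append_dropWhile (p := (· == 'a')) (l := cs.reverse))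
    simp only [List.length_append, List.length_reverse] at this
    omega
  clear_value lead trail
  rw [hA1, hA2, hdw, hrw]
  rw [show cs.length - (cs.length - lead) = lead from by omega,
      show cs.length - (cs.length - trail) = trail from by omega]
  by_cases hgt : lead > trail
  · rw [if_pos (by omega), if_pos (by omega)]
  · rw [if_neg (show ¬((lead:Int) - trail > 0) by omega)]
    rw [if_neg hgt]
    have harg1 : max ((lead : Nat) : Int) 0 = ((lead : Nat) : Int) := max_eq_left (by positivity)
    have harg2 : min ((cs.length : Int) - 1 - trail + 1) (cs.length : Int)
        = ((cs.length - trail : Nat) : Int) := by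
      rw [min_eq_left (by omega)]
      push_cast [Nat.cast_sub htrailne]
      omega
    rw [harg1, harg2]
    set st := PySem.List.slice cs (some ((lead : Nat) : Int)) (some ((cs.length - trail : Nat) : Int)) with hst
    clear_value st
    have hm2 : PySem.Int.mod ((st.length : Nat) : Int) 2 = ((st.length % 2 : Nat) : Int) := by
      exact_mod_cast PySem.Int.mod_natCast st.length 2
    have hf2 : PySem.Int.floordiv ((st.length : Nat) : Int) 2 = ((st.length / 2 : Nat) : Int) := by
      exact_mod_cast PySem.Int.floordiv_natCast st.length 2
    rw [hm2, hf2]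
    by_cases hm0 : st.length = 0
    · have hstnil : st = [] := List.eq_nil_of_length_eq_zero hm0
      rw [if_neg (by rw [hm0]; decide)]
      have hchk : pvChk st (((st.length / 2 : Nat) : Int) - 1) ((st.length / 2 : Nat) : Int) = "Yes" := by
        rw [pvChk, hm0]
        norm_num
      rw [hchk, hstnil]
      simp
    · by_cases hpar : st.length % 2 = 1
      · rw [if_pos (by exact_mod_cast congrArg (Nat.cast : Nat → Int) hpar)]
        have he : ((st.length / 2 : Nat) : Int) = ((st.length - 1 - st.length / 2 : Nat) : Int) := by
          have h' : st.length - 1 - st.length / 2 = st.length / 2 := by omega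
          rw [h']
        conv_lhs => rw [show pvChk st ((st.length / 2 : Nat) : Int) ((st.length / 2 : Nat) : Int)
          = pvChk st ((st.length / 2 : Nat) : Int) ((st.length - 1 - st.length / 2 : Nat) : Int) by rw [← he]]
        rw [pvChk_pal st (st.length / 2) (by omega) (by omega)]
      · rw [if_neg (by
          intro hc
          have h' : st.length % 2 = 1 := by exact_mod_cast hc
          exact hpar h')]
        have hm2' : 2 ≤ st.length := by omega
        have he1 : ((st.length / 2 : Nat) : Int) - 1 = ((st.length / 2 - 1 : Nat) : Int) := by
          have h1 : 1 ≤ st.length / 2 := by omega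
          push_cast [Nat.cast_sub h1]
          ring
        have he2 : ((st.length / 2 : Nat) : Int) = ((st.length - 1 - (st.length / 2 - 1) : Nat) : Int) := by
          have h' : st.length - 1 - (st.length / 2 - 1) = st.length / 2 := by omega
          rw [h']
        rw [he1]
        conv_lhs => rw [he2]
        rw [pvChk_pal st (st.length / 2 - 1) (by omega) (by omega)]

-- ===== VERDICT (by name: the statement is the Claim_ definition above) =====
theorem solution_spec : Claim_equal_solution := by
  intro text _
  exact pvMain text
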